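-- pv_equiv track=rewrite | github.com/RoyaLxPole/Bachelorarbeit | graph_generator.py | find_4_clique_in_graph
-- ===== SOURCE A (Python) =====
-- def find_4_clique_in_graph(matrix):
--     for i in range(len(matrix)):
--         for j in range(i + 1, len(matrix)):
--             if matrix[i][j] >= 3:
--                 for k in range(j + 1, len(matrix)):
--                     if matrix[i][k] >= 3:
--                         if matrix[j][k] >=3:
--                             for l in range(k + 1, len(matrix)):
--                                 if matrix[i][l] >= 3:
--                                     if matrix[j][l] >= 3:
--                                         if matrix[k][l] >= 3:
--                                             return True
--     return False
-- ===== SOURCE B (Python) =====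
-- def find_4_clique_in_graph(matrix):
--     n = len(matrix)
--     # neighbor sets over the upper triangle: j > i with matrix[i][j] >= 3
--     nbrs = [{j for j in range(i + 1, n) if matrix[i][j] >= 3} for i in range(n)]
--     for i in range(n):
--         for j in nbrs[i]:
--             common = nbrs[i] & nbrs[j]
--             for k in common:
--                 if nbrs[k] & common:
--                     return True
--     return False
-- ===== Notes on version B (the rewrite author's own statement) =====
-- stated objective: alternative
-- what changed: Replaces A's four nested index loops (re-scanning matrix rows for every candidate k and l) by precomputed upper-triangle neighbor sets: for each edge (i,j) the common-neighbor set nbrs[i]&nbrs[j] is intersected once, and a 4-clique exists iff some member k of it has a neighbor inside it; worst-case O(n^3) set work vs A's O(n^4), same cost on the sparse benchmark inputs.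
-- outside the precondition, e.g. on find_4_clique_in_graph([[0, 3, 3, 3], [0, 0, 3, 3], [0, 0, 0, 3], [0], []]): A returns True, B raises IndexError
import Mathlib
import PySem

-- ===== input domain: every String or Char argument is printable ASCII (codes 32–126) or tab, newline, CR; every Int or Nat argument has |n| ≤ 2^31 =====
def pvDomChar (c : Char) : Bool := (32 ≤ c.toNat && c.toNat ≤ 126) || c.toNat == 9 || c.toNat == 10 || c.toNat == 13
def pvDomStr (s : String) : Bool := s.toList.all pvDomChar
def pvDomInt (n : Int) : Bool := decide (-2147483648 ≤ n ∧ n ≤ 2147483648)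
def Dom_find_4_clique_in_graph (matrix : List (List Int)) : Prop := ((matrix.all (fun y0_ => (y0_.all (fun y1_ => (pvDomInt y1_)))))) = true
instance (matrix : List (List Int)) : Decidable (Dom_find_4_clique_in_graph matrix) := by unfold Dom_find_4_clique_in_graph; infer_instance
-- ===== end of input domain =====

-- B detects the 4-clique via precomputed upper-triangle neighbor sets and set
-- intersections instead of A's four nested index loops; equivalence is proved on
-- matrices whose non-last rows have length >= n (Pre_).


-- ===== PORT A =====
-- matrix[i][j]; within Pre_ every access is in range, so the defaults never fire
def pvCellA (matrix : List (List Int)) (i j : Int) : Int :=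
  PySem.List.pyGetD (PySem.List.pyGetD matrix i []) j 0

def find_4_clique_in_graph (matrix : List (List Int)) : Bool :=
  let n : Int := matrix.length
  (PySem.List.pyRange 0 n 1).any (fun i =>
    (PySem.List.pyRange (i + 1) n 1).any (fun j =>
      decide (3 ≤ pvCellA matrix i j) &&
      (PySem.List.pyRange (j + 1) n 1).any (fun k =>
        decide (3 ≤ pvCellA matrix i k) &&
        (decide (3 ≤ pvCellA matrix j k) &&
          (PySem.List.pyRange (k + 1) n 1).any (fun l =>
            decide (3 ≤ pvCellA matrix i l) &&
            (decide (3 ≤ pvCellA matrix j l) && decide (3 ≤ pvCellA matrix k l)))))))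

-- ===== PORT B =====
-- the set comprehension building nbrs in Source B (sets of distinct ints, kept in range order);
-- matrix[i][j] is the same pyGetD access as in port A, in range under Pre_
def pvNbrs (matrix : List (List Int)) : List (List Int) :=
  (PySem.List.pyRange 0 (matrix.length : Int) 1).map (fun i =>
    (PySem.List.pyRange (i + 1) (matrix.length : Int) 1).filter (fun j =>
      decide (3 ≤ PySem.List.pyGetD (PySem.List.pyGetD matrix i []) j 0)))

def find_4_clique_in_graph_alt (matrix : List (List Int)) : Bool :=
  let n : Int := matrix.length
  let nbrs := pvNbrs matrix
  (PySem.List.pyRange 0 n 1).any (fun i =>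
    let Ni := PySem.List.pyGetD nbrs i []
    Ni.any (fun j =>
      let common := Ni.filter (fun k => (PySem.List.pyGetD nbrs j []).contains k)
      common.any (fun k =>
        !((PySem.List.pyGetD nbrs k []).filter (fun l => common.contains l)).isEmpty)))

-- ===== PRECONDITION & SPEC =====
-- Pre_ excludes ragged matrices (a non-last row shorter than n), on which Python A raises
-- IndexError except when an early True pre-empts the bad access while B, which precomputes
-- all neighbor sets first, raises there.
def Pre_find_4_clique_in_graph (matrix : List (List Int)) : Prop :=
  ∀ row ∈ matrix.dropLast, matrix.length ≤ row.length
instance (matrix : List (List Int)) : Decidable (Pre_find_4_clique_in_graph matrix) := by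
  unfold Pre_find_4_clique_in_graph; infer_instance

def pvWitness_find_4_clique_in_graph : List (List Int) :=
  [[0, 3, 3, 3], [0, 0, 3, 3], [0, 0, 0, 3], [0, 0, 0, 0]]

def Spec_find_4_clique_in_graph (matrix : List (List Int)) (out : Bool) : Prop := out = find_4_clique_in_graph_alt matrix
instance (matrix : List (List Int)) (out : Bool) : Decidable (Spec_find_4_clique_in_graph matrix out) := by unfold Spec_find_4_clique_in_graph; infer_instance

-- ===== CLAIM (what is proved, stated in full; the proofs are below) =====
def Claim_equal_find_4_clique_in_graph : Prop := ∀ (matrix : List (List Int)), Dom_find_4_clique_in_graph matrix → Pre_find_4_clique_in_graph matrix → Spec_find_4_clique_in_graph matrix (find_4_clique_in_graph matrix)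

-- ===== LEMMAS AND PROOFS =====

-- the common 4-clique property both programs decide
def pvHasClique (m : List (List Int)) : Prop :=
  ∃ i j k l : Int, 0 ≤ i ∧ i < j ∧ j < k ∧ k < l ∧ l < (m.length : Int) ∧
    3 ≤ pvCellA m i j ∧ 3 ≤ pvCellA m i k ∧ 3 ≤ pvCellA m j k ∧
    3 ≤ pvCellA m i l ∧ 3 ≤ pvCellA m j l ∧ 3 ≤ pvCellA m k l

lemma mem_pvNbrs (m : List (List Int)) (i j : Int) (h0 : 0 ≤ i) (h1 : i < (m.length : Int)) :
    j ∈ PySem.List.pyGetD (pvNbrs m) i [] ↔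
      (i < j ∧ j < (m.length : Int) ∧ 3 ≤ pvCellA m i j) := by
  unfold pvNbrs
  rw [PySem.List.pyGetD_map_pyRange_of_nonneg _ _ _ _ h0 h1]
  simp [List.mem_filter, PySem.List.mem_pyRange_one, pvCellA]
  omega

lemma a_true_iff (m : List (List Int)) :
    find_4_clique_in_graph m = true ↔ pvHasClique m := by
  unfold find_4_clique_in_graph pvHasClique
  simp only [List.any_eq_true, Bool.and_eq_true, decide_eq_true_eq, PySem.List.mem_pyRange_one]
  constructor
  · rintro ⟨i, ⟨hi0, hin⟩, j, ⟨hj1, hjn⟩, hij, k, ⟨hk1, hkn⟩, hik, hjk, l, ⟨hl1, hln⟩, hil, hjl, hkl⟩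
    exact ⟨i, j, k, l, hi0, by omega, by omega, by omega, hln, hij, hik, hjk, hil, hjl, hkl⟩
  · rintro ⟨i, j, k, l, hi0, hij, hjk, hkl, hln, e1, e2, e3, e4, e5, e6⟩
    exact ⟨i, ⟨hi0, by omega⟩, j, ⟨by omega, by omega⟩, e1, k, ⟨by omega, by omega⟩, e2, e3, l, ⟨by omega, hln⟩, e4, e5, e6⟩

lemma b_true_iff (m : List (List Int)) :
    find_4_clique_in_graph_alt m = true ↔ pvHasClique m := by
  unfold find_4_clique_in_graph_alt pvHasClique
  simp only [List.any_eq_true, List.mem_filter, List.contains_iff_mem,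
    PySem.List.mem_pyRange_one, Bool.not_eq_eq_eq_not, Bool.not_true,
    List.isEmpty_eq_false_iff, ne_eq, List.filter_eq_nil_iff, not_forall]
  constructor
  · rintro ⟨i, ⟨hi0, hin⟩, j, hj, k, ⟨hkNi, hkNj⟩, l, hlNk, hlc⟩
    rw [mem_pvNbrs m i j hi0 hin] at hj
    obtain ⟨hij, hjn, e1⟩ := hj
    rw [mem_pvNbrs m i k hi0 hin] at hkNi
    obtain ⟨hik, hkn, e2⟩ := hkNi
    rw [mem_pvNbrs m j k (by omega) (by omega)] at hkNj
    obtain ⟨hjk, -, e3⟩ := hkNj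
    rw [mem_pvNbrs m k l (by omega) (by omega)] at hlNk
    obtain ⟨hkl, hln, e6⟩ := hlNk
    rw [not_not] at hlc
    obtain ⟨hlNi, hlNj⟩ := hlc
    rw [mem_pvNbrs m i l hi0 hin] at hlNi
    rw [mem_pvNbrs m j l (by omega) (by omega)] at hlNj
    exact ⟨i, j, k, l, hi0, hij, hjk, hkl, hln, e1, e2, e3, hlNi.2.2, hlNj.2.2, e6⟩
  · rintro ⟨i, j, k, l, hi0, hij, hjk, hkl, hln, e1, e2, e3, e4, e5, e6⟩
    have hin : i < (m.length : Int) := by omega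
    refine ⟨i, ⟨hi0, hin⟩, j, ?_, k, ⟨?_, ?_⟩, l, ?_, ?_⟩
    · exact (mem_pvNbrs m i j hi0 hin).2 ⟨hij, by omega, e1⟩
    · exact (mem_pvNbrs m i k hi0 hin).2 ⟨by omega, by omega, e2⟩
    · exact (mem_pvNbrs m j k (by omega) (by omega)).2 ⟨hjk, by omega, e3⟩
    · exact (mem_pvNbrs m k l (by omega) (by omega)).2 ⟨hkl, hln, e6⟩
    · rw [not_not]
      exact ⟨(mem_pvNbrs m i l hi0 hin).2 ⟨by omega, hln, e4⟩,
             (mem_pvNbrs m j l (by omega) (by omega)).2 ⟨by omega, hln, e5⟩⟩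

lemma ab_eq (m : List (List Int)) :
    find_4_clique_in_graph m = find_4_clique_in_graph_alt m := by
  rw [Bool.eq_iff_iff, a_true_iff, b_true_iff]

-- ===== VERDICT (by name: the statement is the Claim_ definition above) =====
theorem find_4_clique_in_graph_spec : Claim_equal_find_4_clique_in_graph := by
  intro m _ _
  unfold Spec_find_4_clique_in_graph
  exact ab_eq m
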